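-- pv_equiv track=rewrite | github.com/Yuu-taremayu/school | johotsushin/class_11_25/kadai_11_25.py | mlt_3_4b5b
-- ===== SOURCE A (Python) =====
-- def mlt_3_4b5b(bit):
--     conv_bit = []
--     for i in range(0, len(bit), 4):
--         t = bit[i]*8 + bit[i+1]*4 + bit[i+2]*2 + bit[i+3]
--         if t == 0b0000:
--             conv_bit.extend([1, 1, 1, 1, 0])
--         elif t == 0b0001:
--             conv_bit.extend([0, 1, 0, 0, 1])
--         elif t == 0b0010:
--             conv_bit.extend([1, 0, 1, 0, 0])
--         elif t == 0b0011:
--             conv_bit.extend([1, 0, 1, 0, 1])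
--         elif t == 0b0100:
--             conv_bit.extend([0, 1, 0, 1, 0])
--         elif t == 0b0101:
--             conv_bit.extend([0, 1, 0, 1, 1])
--         elif t == 0b0110:
--             conv_bit.extend([0, 1, 1, 1, 0])
--         elif t == 0b0111:
--             conv_bit.extend([0, 1, 1, 1, 1])
--         elif t == 0b1000:
--             conv_bit.extend([1, 0, 0, 1, 0])
--         elif t == 0b1001:
--             conv_bit.extend([1, 0, 0, 1, 1])
--         elif t == 0b1010:
--             conv_bit.extend([1, 0, 1, 1, 0])
--         elif t == 0b1011:
--             conv_bit.extend([1, 0, 1, 1, 1])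
--         elif t == 0b1100:
--             conv_bit.extend([1, 1, 0, 1, 0])
--         elif t == 0b1101:
--             conv_bit.extend([1, 1, 0, 1, 1])
--         elif t == 0b1110:
--             conv_bit.extend([1, 1, 1, 0, 0])
--         elif t == 0b1111:
--             conv_bit.extend([1, 1, 1, 0, 1])
--
--     conv_signal = []
--     level = 1
--     level_prev = 0
--     for i in range(len(conv_bit)):
--         if conv_bit[i] == 1:
--             if level == 1:
--                 level = 0
--                 level_prev = 1
--                 conv_signal.append(1)
--             elif level == 0:
--                 if level_prev == -1:
--                     level = 1
--                     level_prev = 0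
--                 elif level_prev == 1:
--                     level = -1
--                     level_prev = 0
--                 conv_signal.append(0)
--             elif level == -1:
--                 level = 0
--                 level_prev = -1
--                 conv_signal.append(-1)
--         else:
--             if i == 0:
--                 conv_signal.append(0)
--             else:
--                 conv_signal.append(conv_signal[i-1])
--     return conv_signal
-- ===== SOURCE B (Python) =====
-- # 4B5B via a lookup table, MLT-3 via a cyclic pattern indexed by the count of 1-bits.
-- _CODES = {
--     0: [1, 1, 1, 1, 0],  1: [0, 1, 0, 0, 1],
--     2: [1, 0, 1, 0, 0],  3: [1, 0, 1, 0, 1],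
--     4: [0, 1, 0, 1, 0],  5: [0, 1, 0, 1, 1],
--     6: [0, 1, 1, 1, 0],  7: [0, 1, 1, 1, 1],
--     8: [1, 0, 0, 1, 0],  9: [1, 0, 0, 1, 1],
--     10: [1, 0, 1, 1, 0], 11: [1, 0, 1, 1, 1],
--     12: [1, 1, 0, 1, 0], 13: [1, 1, 0, 1, 1],
--     14: [1, 1, 1, 0, 0], 15: [1, 1, 1, 0, 1],
-- }
--
-- _PATTERN = [1, 0, -1, 0]
--
-- def mlt_3_4b5b(bit):
--     conv_bit = []
--     for i in range(0, len(bit), 4):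
--         t = bit[i]*8 + bit[i+1]*4 + bit[i+2]*2 + bit[i+3]
--         code = _CODES.get(t)
--         if code is not None:
--             conv_bit.extend(code)
--     out = []
--     ones = 0
--     last = 0
--     for b in conv_bit:
--         if b == 1:
--             last = _PATTERN[ones % 4]
--             ones += 1
--         out.append(last)
--     return out
-- ===== Notes on version B (the rewrite author's own statement) =====
-- stated objective: simpler
-- what changed: The 16-branch if-elif 4B5B ladder becomes a code-table lookup, and the MLT-3 level/level_prev state machine becomes a cyclic pattern of levels 1, 0, -1, 0 indexed by the running count of 1-bits, with a 'last' register for 0-bits.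
import Mathlib
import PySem

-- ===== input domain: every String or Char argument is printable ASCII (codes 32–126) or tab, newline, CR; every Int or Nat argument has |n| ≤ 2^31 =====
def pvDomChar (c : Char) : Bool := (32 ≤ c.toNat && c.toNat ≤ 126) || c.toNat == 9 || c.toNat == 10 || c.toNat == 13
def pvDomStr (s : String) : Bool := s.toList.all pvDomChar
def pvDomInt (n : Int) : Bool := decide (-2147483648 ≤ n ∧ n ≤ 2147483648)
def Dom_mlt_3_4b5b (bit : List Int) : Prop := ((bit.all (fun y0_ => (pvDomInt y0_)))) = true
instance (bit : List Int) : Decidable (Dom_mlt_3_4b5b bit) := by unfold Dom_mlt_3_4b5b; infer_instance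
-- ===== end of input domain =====

-- B replaces A's if-elif 4B5B ladder by a code table and A's MLT-3 level/level_prev
-- state machine by a cyclic pattern of levels indexed by the running count of 1-bits (objective: simpler).

-- ===== PORT A =====
-- A-side helpers: the bodies of A's two loops.
-- t = bit[i]*8 + bit[i+1]*4 + bit[i+2]*2 + bit[i+3] (the same expression in A and in B)
def pvNib (bit : List Int) (i : Int) : Int :=
  PySem.List.pyGetD bit i 0 * 8 + PySem.List.pyGetD bit (i+1) 0 * 4
    + PySem.List.pyGetD bit (i+2) 0 * 2 + PySem.List.pyGetD bit (i+3) 0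

def pvEncStepA (bit : List Int) (conv : List Int) (i : Int) : List Int :=
  if pvNib bit i = 0 then conv ++ [1, 1, 1, 1, 0]
  else if pvNib bit i = 1 then conv ++ [0, 1, 0, 0, 1]
  else if pvNib bit i = 2 then conv ++ [1, 0, 1, 0, 0]
  else if pvNib bit i = 3 then conv ++ [1, 0, 1, 0, 1]
  else if pvNib bit i = 4 then conv ++ [0, 1, 0, 1, 0]
  else if pvNib bit i = 5 then conv ++ [0, 1, 0, 1, 1]
  else if pvNib bit i = 6 then conv ++ [0, 1, 1, 1, 0]
  else if pvNib bit i = 7 then conv ++ [0, 1, 1, 1, 1]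
  else if pvNib bit i = 8 then conv ++ [1, 0, 0, 1, 0]
  else if pvNib bit i = 9 then conv ++ [1, 0, 0, 1, 1]
  else if pvNib bit i = 10 then conv ++ [1, 0, 1, 1, 0]
  else if pvNib bit i = 11 then conv ++ [1, 0, 1, 1, 1]
  else if pvNib bit i = 12 then conv ++ [1, 1, 0, 1, 0]
  else if pvNib bit i = 13 then conv ++ [1, 1, 0, 1, 1]
  else if pvNib bit i = 14 then conv ++ [1, 1, 1, 0, 0]
  else if pvNib bit i = 15 then conv ++ [1, 1, 1, 0, 1]
  else conv

-- state = (conv_signal, level, level_prev); indices are in range under Pre_, so pyGetD's default is never used there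
def pvSigStepA (conv : List Int) (st : List Int × Int × Int) (i : Int) : List Int × Int × Int :=
  match st with
  | (sig, level, prev) =>
    if PySem.List.pyGetD conv i 0 = 1 then
      if level = 1 then (sig ++ [1], 0, 1)
      else if level = 0 then
        if prev = -1 then (sig ++ [0], 1, 0)
        else if prev = 1 then (sig ++ [0], -1, 0)
        else (sig ++ [0], 0, prev)
      else if level = -1 then (sig ++ [-1], 0, -1)
      else (sig, level, prev)
    else
      if i = 0 then (sig ++ [0], level, prev)
      else (sig ++ [PySem.List.pyGetD sig (i - 1) 0], level, prev)

def mlt_3_4b5b (bit : List Int) : List Int :=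
  let conv := (PySem.List.pyRange 0 (bit.length : Int) 4).foldl (pvEncStepA bit) []
  ((PySem.List.pyRange 0 (conv.length : Int) 1).foldl (pvSigStepA conv) ([], 1, 0)).1

-- ===== PORT B =====
-- B-side helpers: the _CODES dict as a lookup, and the bodies of B's two loops.
def pvCode? (t : Int) : Option (List Int) :=
  if t = 0 then some [1, 1, 1, 1, 0]
  else if t = 1 then some [0, 1, 0, 0, 1]
  else if t = 2 then some [1, 0, 1, 0, 0]
  else if t = 3 then some [1, 0, 1, 0, 1]
  else if t = 4 then some [0, 1, 0, 1, 0]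
  else if t = 5 then some [0, 1, 0, 1, 1]
  else if t = 6 then some [0, 1, 1, 1, 0]
  else if t = 7 then some [0, 1, 1, 1, 1]
  else if t = 8 then some [1, 0, 0, 1, 0]
  else if t = 9 then some [1, 0, 0, 1, 1]
  else if t = 10 then some [1, 0, 1, 1, 0]
  else if t = 11 then some [1, 0, 1, 1, 1]
  else if t = 12 then some [1, 1, 0, 1, 0]
  else if t = 13 then some [1, 1, 0, 1, 1]
  else if t = 14 then some [1, 1, 1, 0, 0]
  else if t = 15 then some [1, 1, 1, 0, 1]
  else none

def pvEncStepB (bit : List Int) (conv : List Int) (i : Int) : List Int :=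
  match pvCode? (pvNib bit i) with
  | some code => conv ++ code
  | none => conv

-- state = (signal, ones, last); ones % 4 < 4 so the pattern index is in range
def pvSigStepB (st : List Int × Int × Int) (b : Int) : List Int × Int × Int :=
  match st with
  | (sig, ones, last) =>
    if b = 1 then
      (sig ++ [PySem.List.pyGetD [1, 0, -1, 0] (PySem.Int.mod ones 4) 0], ones + 1,
        PySem.List.pyGetD [1, 0, -1, 0] (PySem.Int.mod ones 4) 0)
    else (sig ++ [last], ones, last)

def mlt_3_4b5b_alt (bit : List Int) : List Int :=
  let conv := (PySem.List.pyRange 0 (bit.length : Int) 4).foldl (pvEncStepB bit) []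
  (conv.foldl pvSigStepB ([], 0, 0)).1

-- ===== PRECONDITION & SPEC =====
-- Python A raises IndexError (bit[i+1] past the end) when len(bit) is not a multiple of 4.
def Pre_mlt_3_4b5b (bit : List Int) : Prop := bit.length % 4 = 0
instance (bit : List Int) : Decidable (Pre_mlt_3_4b5b bit) := by unfold Pre_mlt_3_4b5b; infer_instance
def pvWitness_mlt_3_4b5b : List Int := [1, 0, 1, 1, 0, 0, 0, 0]

def Spec_mlt_3_4b5b (bit : List Int) (out : List Int) : Prop := out = mlt_3_4b5b_alt bit
instance (bit : List Int) (out : List Int) : Decidable (Spec_mlt_3_4b5b bit out) := by unfold Spec_mlt_3_4b5b; infer_instance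

-- ===== CLAIM (what is proved, stated in full; the proofs are below) =====
def Claim_equal_mlt_3_4b5b : Prop := ∀ (bit : List Int), Dom_mlt_3_4b5b bit → Pre_mlt_3_4b5b bit → Spec_mlt_3_4b5b bit (mlt_3_4b5b bit)

-- ===== LEMMAS AND PROOFS =====

-- the (level, level_prev) pair of A's FSM as a function of (number of 1s seen) mod 4
def pvState (r : Int) : Int × Int :=
  if r = 1 then (0, 1) else if r = 2 then (-1, 0) else if r = 3 then (0, -1) else (1, 0)

lemma pvEncStep_eq (bit : List Int) : pvEncStepA bit = pvEncStepB bit := by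
  funext conv i
  unfold pvEncStepA pvEncStepB
  generalize pvNib bit i = t
  by_cases h0 : t = 0
  · simp [pvCode?, h0]
  by_cases h1 : t = 1
  · simp [pvCode?, h1]
  by_cases h2 : t = 2
  · simp [pvCode?, h2]
  by_cases h3 : t = 3
  · simp [pvCode?, h3]
  by_cases h4 : t = 4
  · simp [pvCode?, h4]
  by_cases h5 : t = 5
  · simp [pvCode?, h5]
  by_cases h6 : t = 6
  · simp [pvCode?, h6]
  by_cases h7 : t = 7
  · simp [pvCode?, h7]
  by_cases h8 : t = 8
  · simp [pvCode?, h8]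
  by_cases h9 : t = 9
  · simp [pvCode?, h9]
  by_cases h10 : t = 10
  · simp [pvCode?, h10]
  by_cases h11 : t = 11
  · simp [pvCode?, h11]
  by_cases h12 : t = 12
  · simp [pvCode?, h12]
  by_cases h13 : t = 13
  · simp [pvCode?, h13]
  by_cases h14 : t = 14
  · simp [pvCode?, h14]
  by_cases h15 : t = 15
  · simp [pvCode?, h15]
  · simp [pvCode?, h0, h1, h2, h3, h4, h5, h6, h7, h8, h9, h10, h11, h12, h13, h14, h15]

lemma pvCode_mem {t : Int} {code : List Int} (h : pvCode? t = some code) :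
    ∀ x ∈ code, x = 0 ∨ x = 1 := by
  unfold pvCode? at h
  by_cases h0 : t = 0
  · simp [h0] at h; subst h; intro x hx; simp at hx; omega
  by_cases h1 : t = 1
  · simp [h1] at h; subst h; intro x hx; simp at hx; omega
  by_cases h2 : t = 2
  · simp [h2] at h; subst h; intro x hx; simp at hx; omega
  by_cases h3 : t = 3
  · simp [h3] at h; subst h; intro x hx; simp at hx; omega
  by_cases h4 : t = 4
  · simp [h4] at h; subst h; intro x hx; simp at hx; omega
  by_cases h5 : t = 5
  · simp [h5] at h; subst h; intro x hx; simp at hx; omega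
  by_cases h6 : t = 6
  · simp [h6] at h; subst h; intro x hx; simp at hx; omega
  by_cases h7 : t = 7
  · simp [h7] at h; subst h; intro x hx; simp at hx; omega
  by_cases h8 : t = 8
  · simp [h8] at h; subst h; intro x hx; simp at hx; omega
  by_cases h9 : t = 9
  · simp [h9] at h; subst h; intro x hx; simp at hx; omega
  by_cases h10 : t = 10
  · simp [h10] at h; subst h; intro x hx; simp at hx; omega
  by_cases h11 : t = 11
  · simp [h11] at h; subst h; intro x hx; simp at hx; omega
  by_cases h12 : t = 12
  · simp [h12] at h; subst h; intro x hx; simp at hx; omega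
  by_cases h13 : t = 13
  · simp [h13] at h; subst h; intro x hx; simp at hx; omega
  by_cases h14 : t = 14
  · simp [h14] at h; subst h; intro x hx; simp at hx; omega
  by_cases h15 : t = 15
  · simp [h15] at h; subst h; intro x hx; simp at hx; omega
  · simp [h0, h1, h2, h3, h4, h5, h6, h7, h8, h9, h10, h11, h12, h13, h14, h15] at h

lemma pvConvB_mem (bit : List Int) :
    ∀ (l : List Int) (acc : List Int), (∀ x ∈ acc, x = 0 ∨ x = 1) →
      ∀ x ∈ l.foldl (pvEncStepB bit) acc, x = 0 ∨ x = 1 := by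
  intro l
  induction l with
  | nil => intro acc hacc x hx; exact hacc x hx
  | cons c cs ih =>
    intro acc hacc x hx
    refine ih _ ?_ x hx
    intro y hy
    unfold pvEncStepB at hy
    rcases hcode : pvCode? (pvNib bit c) with _ | code
    · rw [hcode] at hy; exact hacc y hy
    · rw [hcode] at hy
      rcases List.mem_append.1 hy with h | h
      · exact hacc y h
      · exact pvCode_mem hcode y h

lemma pvGetD_append (sig : List Int) (x : Int) :
    (sig ++ [x]).getD ((sig ++ [x]).length - 1) 0 = x := by
  simp [List.getD]

lemma pvMod4_succ (ones : Int) :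
    PySem.Int.mod (ones + 1) 4 = PySem.Int.mod (PySem.Int.mod ones 4 + 1) 4 := by
  simp only [PySem.Int.mod_eq_emod_of_pos (by norm_num : (0:Int) < 4)]
  omega

lemma pvLoop_eq (conv : List Int) :
    ∀ (cs sig : List Int) (level prev ones last : Int),
      conv.drop sig.length = cs →
      (∀ x ∈ cs, x = 0 ∨ x = 1) →
      sig.getD (sig.length - 1) 0 = last →
      0 ≤ ones →
      (level, prev) = pvState (PySem.Int.mod ones 4) →
      ((PySem.List.pyRange (sig.length : Int) (conv.length : Int) 1).foldl (pvSigStepA conv) (sig, level, prev)).1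
        = (cs.foldl pvSigStepB (sig, ones, last)).1 := by
  intro cs
  induction cs with
  | nil =>
    intro sig level prev ones last hdrop _ _ _ _
    have hlen : conv.length ≤ sig.length := by
      by_contra h
      exact absurd hdrop (by simp [List.drop_eq_nil_iff]; omega)
    rw [PySem.List.pyRange_one_eq_nil (by exact_mod_cast hlen)]
    rfl
  | cons c cs ih =>
    intro sig level prev ones last hdrop hmem hlast hones hstate
    have hlt : sig.length < conv.length := by
      have := congrArg List.length hdrop
      simp at this
      omega
    have hdrop' : conv.drop (sig.length + 1) = cs := by
      have := congrArg List.tail hdrop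
      simpa [List.tail_drop] using this
    have hget : PySem.List.pyGetD conv (sig.length : Int) 0 = c := by
      have h0 : conv[sig.length]? = some c := by
        have h1 : (List.drop sig.length conv)[0]? = conv[sig.length + 0]? := List.getElem?_drop
        rw [hdrop] at h1
        simpa using h1.symm
      simp [PySem.List.pyGetD_natCast, List.getD, h0]
    rw [PySem.List.pyRange_one_cons (by exact_mod_cast hlt), List.foldl_cons, List.foldl_cons]
    rcases hmem c List.mem_cons_self with hc | hc
    · -- c = 0 : both sides append `last`, state unchanged
      subst hc
      have hA : pvSigStepA conv (sig, level, prev) (sig.length : Int) = (sig ++ [last], level, prev) := by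
        rcases List.eq_nil_or_concat sig with hnil | _
        · subst hnil
          simp only [List.length_nil, Nat.cast_zero] at hget
          simp at hlast
          simp [pvSigStepA, hget, ← hlast]
        · have hpos : 0 < sig.length := by
            rcases sig with _ | _
            · simp_all
            · simp
          have hidx : (sig.length : Int) - 1 = ((sig.length - 1 : Nat) : Int) := by omega
          have hne : (sig.length : Int) ≠ 0 := by omega
          have hne0 : sig ≠ [] := by rintro rfl; simp at hpos
          simp [pvSigStepA, hget, hidx, PySem.List.pyGetD_natCast, hne0]
          simpa [List.getD] using hlast
      have hB : pvSigStepB (sig, ones, last) 0 = (sig ++ [last], ones, last) := by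
        simp [pvSigStepB]
      rw [hA, hB]
      have hlen1 : ((sig.length : Int) + 1) = (((sig ++ [last]).length : Nat) : Int) := by
        simp
      rw [hlen1]
      exact ih (sig ++ [last]) level prev ones last (by simpa using hdrop')
        (fun x hx => hmem x (List.mem_cons_of_mem _ hx)) (pvGetD_append sig last) hones hstate
    · -- c = 1 : A's FSM step matches the cyclic pattern at (ones % 4)
      subst hc
      have hr0 : 0 ≤ PySem.Int.mod ones 4 := PySem.Int.mod_nonneg ones (by norm_num)
      have hr4 : PySem.Int.mod ones 4 < 4 := PySem.Int.mod_lt ones (by norm_num)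
      have hcases : PySem.Int.mod ones 4 = 0 ∨ PySem.Int.mod ones 4 = 1 ∨
          PySem.Int.mod ones 4 = 2 ∨ PySem.Int.mod ones 4 = 3 := by omega
      have step : ∀ (x l' p' : Int),
          pvSigStepA conv (sig, level, prev) (sig.length : Int) = (sig ++ [x], l', p') →
          pvSigStepB (sig, ones, last) 1 = (sig ++ [x], ones + 1, x) →
          (l', p') = pvState (PySem.Int.mod (ones + 1) 4) →
          ((PySem.List.pyRange ((sig.length : Int) + 1) (conv.length : Int) 1).foldl (pvSigStepA conv)
              (pvSigStepA conv (sig, level, prev) (sig.length : Int))).1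
            = (cs.foldl pvSigStepB (pvSigStepB (sig, ones, last) 1)).1 := by
        intro x l' p' hA hB hst'
        rw [hA, hB]
        have hlen1 : ((sig.length : Int) + 1) = (((sig ++ [x]).length : Nat) : Int) := by
          simp
        rw [hlen1]
        exact ih (sig ++ [x]) l' p' (ones + 1) x (by simpa using hdrop')
          (fun y hy => hmem y (List.mem_cons_of_mem _ hy)) (pvGetD_append sig x) (by omega) hst'
      rcases hcases with hr | hr | hr | hr <;>
        rw [hr] at hstate <;> simp [pvState] at hstate <;> obtain ⟨hl, hp⟩ := hstate
      · exact step 1 0 1 (by subst hl hp; simp [pvSigStepA, hget])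
          (by
            have hrE : ones % 4 = 0 := by
              rw [← PySem.Int.mod_eq_emod_of_pos (by norm_num : (0:Int) < 4)]; exact hr
            simp [pvSigStepB, hrE, PySem.List.pyGetD, PySem.List.pyGet?, PySem.List.pyIdx?])
          (by rw [pvMod4_succ, hr]; decide)
      · exact step 0 (-1) 0 (by subst hl hp; simp [pvSigStepA, hget])
          (by
            have hrE : ones % 4 = 1 := by
              rw [← PySem.Int.mod_eq_emod_of_pos (by norm_num : (0:Int) < 4)]; exact hr
            simp [pvSigStepB, hrE, PySem.List.pyGetD, PySem.List.pyGet?, PySem.List.pyIdx?])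
          (by rw [pvMod4_succ, hr]; decide)
      · exact step (-1) 0 (-1) (by subst hl hp; simp [pvSigStepA, hget])
          (by
            have hrE : ones % 4 = 2 := by
              rw [← PySem.Int.mod_eq_emod_of_pos (by norm_num : (0:Int) < 4)]; exact hr
            simp [pvSigStepB, hrE, PySem.List.pyGetD, PySem.List.pyGet?, PySem.List.pyIdx?])
          (by rw [pvMod4_succ, hr]; decide)
      · exact step 0 1 0 (by subst hl hp; simp [pvSigStepA, hget])
          (by
            have hrE : ones % 4 = 3 := by
              rw [← PySem.Int.mod_eq_emod_of_pos (by norm_num : (0:Int) < 4)]; exact hr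
            simp [pvSigStepB, hrE, PySem.List.pyGetD, PySem.List.pyGet?, PySem.List.pyIdx?])
          (by rw [pvMod4_succ, hr]; decide)

-- ===== VERDICT (by name: the statement is the Claim_ definition above) =====
theorem mlt_3_4b5b_spec : Claim_equal_mlt_3_4b5b := by
  intro bit _ _
  unfold Spec_mlt_3_4b5b mlt_3_4b5b mlt_3_4b5b_alt
  rw [pvEncStep_eq]
  exact pvLoop_eq _ _ [] 1 0 0 0 (by simp) (pvConvB_mem bit _ [] (by simp)) rfl le_rfl rfl
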